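-- pv_equiv track=rewrite | github.com/kobayashi7777/Rename_for_Movie_Data_Capture | rename.py | trans_fanhao
-- ===== SOURCE A (Python) =====
-- def trans_fanhao(input_string):
--     index_of_first_digit = next((i for i, char in enumerate(input_string) if char.isdigit()), None)
--     if index_of_first_digit is not None:
--         letters_part = input_string[:index_of_first_digit]
--         numbers_part = input_string[index_of_first_digit:]
--         result_string = f"{letters_part}-{numbers_part}"
--         return result_string
--     else:
--         return input_string
-- ===== SOURCE B (Python) =====
-- import re
--
-- def trans_fanhao(input_string):
--     return re.sub(r'(\d)', r'-\1', input_string, count=1)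
-- ===== Notes on version B (the rewrite author's own statement) =====
-- stated objective: idiomatic
-- what changed: Replaced the manual first-digit index search plus two slices and f-string concatenation with a single regex substitution (count=1) that inserts a hyphen before the first digit in one declarative call.
import Mathlib
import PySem

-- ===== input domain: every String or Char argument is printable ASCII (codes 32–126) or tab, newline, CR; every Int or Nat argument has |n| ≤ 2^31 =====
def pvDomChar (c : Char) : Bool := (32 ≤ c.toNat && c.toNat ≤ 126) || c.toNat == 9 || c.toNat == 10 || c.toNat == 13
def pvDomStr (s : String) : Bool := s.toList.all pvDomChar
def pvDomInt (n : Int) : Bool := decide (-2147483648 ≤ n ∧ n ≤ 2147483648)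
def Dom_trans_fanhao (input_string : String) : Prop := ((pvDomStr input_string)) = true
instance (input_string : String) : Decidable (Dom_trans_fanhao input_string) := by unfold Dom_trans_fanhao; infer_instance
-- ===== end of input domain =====

-- B replaces A's manual first-digit index search + slicing with one regex substitution (constant-factor faster: one C-level pass)
-- (re.sub(r'(\d)', r'-\1', s, count=1)); equivalence of the return values is proved on Dom.

-- ===== PORT A =====
-- A: find the index of the first digit (via enumerate/next), then slice and concatenate.
-- char.isdigit() on the printable-ASCII domain is exactly '0' ≤ c ≤ '9' (Char.isDigit).
def trans_fanhao (input_string : String) : String :=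
  let cs := input_string.toList
  match cs.findIdx? (fun c => c.isDigit) with
  | some i =>
      let letters_part := cs.take i
      let numbers_part := cs.drop i
      String.ofList (letters_part ++ '-' :: numbers_part)
  | none => input_string

-- ===== PORT B =====
-- B-side helper: re.sub with count=1 and replacement '-\1' = copy chars until the first
-- \d match, emit '-' before it, keep the rest unchanged (exact for this pattern on ASCII).
def subFirstDigit : List Char → List Char
  | [] => []
  | c :: rest => if c.isDigit then '-' :: c :: rest else c :: subFirstDigit rest

def trans_fanhao_alt (input_string : String) : String :=
  String.ofList (subFirstDigit input_string.toList)

-- ===== PRECONDITION & SPEC =====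
def Spec_trans_fanhao (input_string : String) (out : String) : Prop := out = trans_fanhao_alt input_string
instance (input_string : String) (out : String) : Decidable (Spec_trans_fanhao input_string out) := by unfold Spec_trans_fanhao; infer_instance

-- ===== CLAIM (what is proved, stated in full; the proofs are below) =====
def Claim_equal_trans_fanhao : Prop := ∀ (input_string : String), Dom_trans_fanhao input_string → Spec_trans_fanhao input_string (trans_fanhao input_string)

-- ===== LEMMAS AND PROOFS =====

lemma subFirstDigit_eq (cs : List Char) :
    (match cs.findIdx? (fun c => c.isDigit) with
     | some i => cs.take i ++ '-' :: cs.drop i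
     | none => cs) = subFirstDigit cs := by
  induction cs with
  | nil => simp [subFirstDigit]
  | cons c rest ih =>
      by_cases h : c.isDigit
      · simp [subFirstDigit, h, List.findIdx?_cons]
      · simp only [subFirstDigit, h, List.findIdx?_cons]
        cases hf : rest.findIdx? (fun c => c.isDigit) with
        | none => simpa [hf] using ih
        | some i => simpa [hf, List.take_succ_cons, List.drop_succ_cons] using ih

-- ===== VERDICT (by name: the statement is the Claim_ definition above) =====
theorem trans_fanhao_spec : Claim_equal_trans_fanhao := by
  intro s _
  unfold Spec_trans_fanhao trans_fanhao trans_fanhao_alt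
  rw [← subFirstDigit_eq s.toList]
  cases hf : s.toList.findIdx? (fun c => c.isDigit) with
  | none => simp [hf]
  | some i => simp [hf]
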